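-- pv_equiv track=rewrite | github.com/PatrickMilano21/news-digest-engine | src/advisor.py | _trim_history
-- ===== SOURCE A (Python) =====
-- from typing import Any
--
-- HISTORY_WINDOW = 15  # Keep system + user context + last N turns
--
-- def _trim_history(messages: list[dict[str, Any]]) -> list[dict[str, Any]]:
--     """
--     Keep system message + user context message + last HISTORY_WINDOW turns.
--
--     A 'turn' is an assistant message plus its subsequent tool response messages.
--     """
--     if len(messages) <= 2:
--         return messages
--
--     # Always keep first 2 messages (system + user context)
--     prefix = messages[:2]
--     rest = messages[2:]
--
--     # Count turns: each assistant message starts a new turn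
--     turns: list[list[dict]] = []
--     current_turn: list[dict] = []
--
--     for msg in rest:
--         if msg.get("role") == "assistant":
--             if current_turn:
--                 turns.append(current_turn)
--             current_turn = [msg]
--         else:
--             current_turn.append(msg)
--
--     if current_turn:
--         turns.append(current_turn)
--
--     # Keep last HISTORY_WINDOW turns
--     if len(turns) > HISTORY_WINDOW:
--         turns = turns[-HISTORY_WINDOW:]
--
--     # Flatten back
--     trimmed = prefix
--     for turn in turns:
--         trimmed.extend(turn)
--
--     return trimmed
-- ===== SOURCE B (Python) =====
-- HISTORY_WINDOW = 15  # Keep system + user context + last N turns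
--
--
-- def _suffix_from_nth_assistant(msgs, n):
--     """Suffix of msgs starting at the n-th assistant message (1-based, from the front)."""
--     if not msgs:
--         return []
--     if msgs[0].get("role") == "assistant":
--         if n == 1:
--             return msgs
--         return _suffix_from_nth_assistant(msgs[1:], n - 1)
--     return _suffix_from_nth_assistant(msgs[1:], n)
--
--
-- def _trim_history(messages):
--     if len(messages) <= 2:
--         return messages
--     prefix, rest = messages[:2], messages[2:]
--     # rest[0] always starts the first turn; each later assistant message starts a new one
--     turns = 1 + sum(1 for m in rest[1:] if m.get("role") == "assistant")
--     if turns <= HISTORY_WINDOW: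
--         return prefix + rest
--     return prefix + _suffix_from_nth_assistant(rest[1:], turns - HISTORY_WINDOW)
-- ===== Notes on version B (the rewrite author's own statement) =====
-- stated objective: simpler
-- what changed: Instead of building a list of per-turn message lists and re-flattening it, B counts the turns once (1 + number of assistant messages after the first kept message) and, when over the window, returns the suffix starting at the (turns-15)-th assistant boundary found by a single scan.
import Mathlib
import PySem

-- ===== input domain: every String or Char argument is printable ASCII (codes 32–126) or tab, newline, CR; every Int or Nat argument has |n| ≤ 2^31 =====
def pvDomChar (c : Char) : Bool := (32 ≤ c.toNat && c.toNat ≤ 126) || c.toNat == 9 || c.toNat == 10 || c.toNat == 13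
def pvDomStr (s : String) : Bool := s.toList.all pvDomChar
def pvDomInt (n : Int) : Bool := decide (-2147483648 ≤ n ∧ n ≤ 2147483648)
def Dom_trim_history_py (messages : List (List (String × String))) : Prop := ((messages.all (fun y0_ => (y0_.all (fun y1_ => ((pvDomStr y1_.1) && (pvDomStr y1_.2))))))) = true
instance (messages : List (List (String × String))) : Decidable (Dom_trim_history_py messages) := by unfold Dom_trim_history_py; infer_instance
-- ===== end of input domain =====

-- B replaces A's build-groups-then-flatten pass by a turn count plus a single scan to the
-- first kept turn boundary (objective: simpler — no intermediate list of turn lists).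
-- Neither version mutates its argument; the claim is about the return value.

-- ===== PORT A =====
-- msg.get("role") == "assistant"  (dict lookup = first match)
def pvIsAssist (m : List (String × String)) : Bool :=
  (PySem.Dict.mk m).get? "role" == some "assistant"

-- the loop body: appends current_turn to turns at an assistant message
def pvStepA (st : List (List (List (String × String))) × List (List (String × String)))
    (msg : List (String × String)) :
    List (List (List (String × String))) × List (List (String × String)) :=
  if pvIsAssist msg then
    ((if st.2 = [] then st.1 else st.1 ++ [st.2]), [msg])
  else
    (st.1, st.2 ++ [msg])

def trim_history_py (messages : List (List (String × String))) : List (List (String × String)) :=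
  if messages.length ≤ 2 then messages
  else
    let prefix_ := PySem.List.slice messages none (some 2)
    let rest := PySem.List.slice messages (some 2) none
    let st := rest.foldl pvStepA ([], [])
    let turns := if st.2 = [] then st.1 else st.1 ++ [st.2]
    let turns := if turns.length > 15 then PySem.List.slice turns (some (-15)) none else turns
    turns.foldl (fun acc t => acc ++ t) prefix_

-- ===== PORT B =====
def pvSuffixFromNth (msgs : List (List (String × String))) (n : Int) :
    List (List (String × String)) :=
  match msgs with
  | [] => []
  | m :: ms =>
    if pvIsAssist m then
      (if n == 1 then m :: ms else pvSuffixFromNth ms (n - 1))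
    else pvSuffixFromNth ms n

def trim_history_py_alt (messages : List (List (String × String))) : List (List (String × String)) :=
  if messages.length ≤ 2 then messages
  else
    let prefix_ := PySem.List.slice messages none (some 2)
    let rest := PySem.List.slice messages (some 2) none
    let turns : Int := 1 + ((PySem.List.slice rest (some 1) none).countP pvIsAssist : Int)
    if turns ≤ 15 then prefix_ ++ rest
    else prefix_ ++ pvSuffixFromNth (PySem.List.slice rest (some 1) none) (turns - 15)

-- ===== PRECONDITION & SPEC =====
def Spec_trim_history_py (messages : List (List (String × String))) (out : List (List (String × String))) : Prop := out = trim_history_py_alt messages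
instance (messages : List (List (String × String))) (out : List (List (String × String))) : Decidable (Spec_trim_history_py messages out) := by unfold Spec_trim_history_py; infer_instance

-- ===== CLAIM (what is proved, stated in full; the proofs are below) =====
def Claim_equal_trim_history_py : Prop := ∀ (messages : List (List (String × String))), Dom_trim_history_py messages → Spec_trim_history_py messages (trim_history_py messages)

-- ===== LEMMAS AND PROOFS =====

-- proof-side grouping: G cur ms = the list of turns of cur ++ ms, cur being the open turn
def pvG (cur : List (List (String × String))) (ms : List (List (String × String))) :
    List (List (List (String × String))) :=
  match ms with
  | [] => [cur]
  | m :: ms => if pvIsAssist m then cur :: pvG [m] ms else pvG (cur ++ [m]) ms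

theorem pvG_flatten (ms cur : List (List (String × String))) :
    (pvG cur ms).flatten = cur ++ ms := by
  induction ms generalizing cur with
  | nil => simp [pvG]
  | cons m ms ih =>
    by_cases h : pvIsAssist m = true <;> simp [pvG, h, ih]

theorem pvG_length (ms cur : List (List (String × String))) :
    (pvG cur ms).length = 1 + ms.countP pvIsAssist := by
  induction ms generalizing cur with
  | nil => simp [pvG]
  | cons m ms ih =>
    by_cases h : pvIsAssist m = true <;>
      simp [pvG, h, ih] <;> omega

theorem pvLoopA_eq (ms : List (List (String × String)))
    (turns : List (List (List (String × String)))) (cur : List (List (String × String)))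
    (hcur : cur ≠ []) :
    (let st := ms.foldl pvStepA (turns, cur);
     if st.2 = [] then st.1 else st.1 ++ [st.2]) = turns ++ pvG cur ms := by
  induction ms generalizing turns cur with
  | nil => simp [pvG, hcur]
  | cons m ms ih =>
    by_cases h : pvIsAssist m = true
    · rw [show (m :: ms).foldl pvStepA (turns, cur) = ms.foldl pvStepA (turns ++ [cur], [m]) by
        simp [pvStepA, h, hcur]]
      rw [ih (turns ++ [cur]) [m] (by simp)]
      simp [pvG, h]
    · rw [show (m :: ms).foldl pvStepA (turns, cur) = ms.foldl pvStepA (turns, cur ++ [m]) by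
        simp [pvStepA, h]]
      rw [ih turns (cur ++ [m]) (by simp)]
      simp [pvG, h]

theorem pvMain (ms cur : List (List (String × String))) (d : Nat)
    (hcur : cur ≠ []) (h1 : 1 ≤ d) (h2 : d ≤ ms.countP pvIsAssist) :
    ((pvG cur ms).drop d).flatten = pvSuffixFromNth ms (d : Int) := by
  induction ms generalizing cur d with
  | nil => simp [List.countP_nil] at h2; omega
  | cons m ms ih =>
    by_cases h : pvIsAssist m = true
    · rw [show pvG cur (m :: ms) = cur :: pvG [m] ms by simp [pvG, h]]
      rw [show (cur :: pvG [m] ms).drop d = (pvG [m] ms).drop (d - 1) by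
        cases d with
        | zero => omega
        | succ k => simp]
      by_cases hd : d = 1
      · subst hd
        simp [pvSuffixFromNth, h, pvG_flatten]
      · have h2' : d - 1 ≤ ms.countP pvIsAssist := by
          simp [h] at h2; omega
        rw [ih [m] (d - 1) (by simp) (by omega) h2']
        have hne : ((d : Int) == 1) = false := by
          simp; omega
        simp only [pvSuffixFromNth, h, if_true, hne, Bool.false_eq_true, if_false]
        congr 1
        omega
    · rw [show pvG cur (m :: ms) = pvG (cur ++ [m]) ms by simp [pvG, h]]
      have h2' : d ≤ ms.countP pvIsAssist := by
        simp [h] at h2; omega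
      rw [ih (cur ++ [m]) d (by simp) h1 h2']
      simp [pvSuffixFromNth, h]

theorem pvFoldl_append (ts : List (List (List (String × String))))
    (acc : List (List (String × String))) :
    ts.foldl (fun acc t => acc ++ t) acc = acc ++ ts.flatten := by
  induction ts generalizing acc with
  | nil => simp
  | cons t ts ih => simp [ih, List.append_assoc]

-- ===== VERDICT (by name: the statement is the Claim_ definition above) =====
theorem trim_history_py_spec : Claim_equal_trim_history_py := by
  intro messages _
  unfold Spec_trim_history_py trim_history_py trim_history_py_alt
  by_cases hlen : messages.length ≤ 2
  · simp [hlen]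
  · simp only [hlen, if_false]
    have h2 : 2 ≤ messages.length := by omega
    rw [show PySem.List.slice messages (some 2) none = messages.drop 2 by
      simpa using PySem.List.slice_from_natCast messages 2]
    rcases hrest : messages.drop 2 with _ | ⟨r0, rs⟩
    · exfalso
      have := congrArg List.length hrest
      simp at this
      omega
    · have hfirst : pvStepA ([], []) r0 = ([], [r0]) := by
        by_cases h : pvIsAssist r0 = true <;> simp [pvStepA, h]
      rw [show PySem.List.slice (r0 :: rs) (some 1) none = rs by
        simpa using PySem.List.slice_from_natCast (r0 :: rs) 1]
      have hT : (let st := (r0 :: rs).foldl pvStepA ([], []);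
          if st.2 = [] then st.1 else st.1 ++ [st.2]) = pvG [r0] rs := by
        rw [show (r0 :: rs).foldl pvStepA ([], []) = rs.foldl pvStepA ([], [r0]) by
          simp [hfirst]]
        simpa using pvLoopA_eq rs [] [r0] (by simp)
      simp only at hT
      rw [hT]
      set c := rs.countP pvIsAssist with hc
      have hn : (pvG [r0] rs).length = 1 + c := pvG_length rs [r0]
      by_cases hbig : (pvG [r0] rs).length > 15
      · have hcge : 15 ≤ c := by omega
        rw [if_pos hbig]
        rw [PySem.List.slice_from_neg_ofNat (pvG [r0] rs) 15 (by omega)]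
        rw [pvFoldl_append]
        have hbB : ¬ (1 + (c : Int) ≤ 15) := by omega
        rw [if_neg hbB]
        congr 1
        rw [show (pvG [r0] rs).length - 15 = c - 14 by omega]
        rw [pvMain rs [r0] (c - 14) (by simp) (by omega) (by omega)]
        congr 1
        omega
      · rw [if_neg hbig, pvFoldl_append, pvG_flatten]
        have hbB : (1 + (c : Int) ≤ 15) := by omega
        rw [if_pos hbB]
        simp
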